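-- pv_equiv track=rewrite | github.com/lnxy97-cmyk/optimal-samples-selection-system | solver.py | build_cover_bits
-- ===== SOURCE A (Python) =====
-- from itertools import combinations
-- from typing import Any, Dict, List, Sequence, Tuple
--
-- def to_mask(group: Sequence[int]) -> int:
--     """Convert a group like (1, 3, 5) to a bitmask."""
--     mask = 0
--     for x in group:
--         mask |= 1 << (x - 1)
--     return mask
--
-- def is_covered_mask(k_mask: int, j_mask: int, s: int) -> bool:
--     """Whether the k-group and j-group have at least s common elements."""
--     return (k_mask & j_mask).bit_count() >= s
--
-- def build_cover_bits(
--     candidate_groups: List[Tuple[int, ...]],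
--     candidate_masks: List[int],
--     target_masks: List[int],
--     s: int,
--     j: int,
-- ) -> List[int]:
--     """
--     Build coverage information for each candidate.
--
--     Normal case:
--         Check each candidate against each target.
--
--     Faster case when s == j:
--         A target is covered only if all its j elements are inside the candidate.
--         So we only need to generate j-combinations inside each candidate.
--     """
--
--     # Fast path: when s == j, target must be a subset of candidate
--     if s == j:
--         target_index = {mask: idx for idx, mask in enumerate(target_masks)}
--         cover_bits = []
--
--         for group in candidate_groups:
--             bits = 0
--
--             # Only generate target groups that are inside this candidate
--             for sub_group in combinations(group, j):
--                 sub_mask = to_mask(sub_group)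
--                 idx = target_index.get(sub_mask)
--
--                 if idx is not None:
--                     bits |= 1 << idx
--
--             cover_bits.append(bits)
--
--         return cover_bits
--
--     # General case
--     cover_bits = []
--     for k_mask in candidate_masks:
--         bits = 0
--         for t_idx, t_mask in enumerate(target_masks):
--             if is_covered_mask(k_mask, t_mask, s):
--                 bits |= 1 << t_idx
--         cover_bits.append(bits)
--
--     return cover_bits
-- ===== SOURCE B (Python) =====
-- from itertools import combinations
--
--
-- def build_cover_bits(candidate_groups, candidate_masks, target_masks, s, j):
--     if s == j:
--         # A target is covered iff its mask equals the mask of some j-subset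
--         # of the candidate: collect those subset masks once, then scan targets.
--         cover_bits = []
--         for group in candidate_groups:
--             subs = set()
--             for sub in combinations(group, j):
--                 m = 0
--                 for x in sub:
--                     m |= 1 << (x - 1)
--                 subs.add(m)
--             bits = 0
--             for t_idx, t_mask in enumerate(target_masks):
--                 if t_mask in subs:
--                     bits |= 1 << t_idx
--             cover_bits.append(bits)
--         return cover_bits
--
--     # General case: target-major accumulation into a per-candidate array.
--     bits_list = [0] * len(candidate_masks)
--     for t_idx, t_mask in enumerate(target_masks):
--         for k_idx, k_mask in enumerate(candidate_masks):
--             if (k_mask & t_mask).bit_count() >= s: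
--                 bits_list[k_idx] |= 1 << t_idx
--     return bits_list
-- ===== Notes on version B (the rewrite author's own statement) =====
-- stated objective: alternative
-- what changed: General case: loop order interchanged (target-major, accumulating into a per-candidate bits array); s==j fast path: a per-candidate set of subset masks with one forward scan over targets, instead of a mask->index dict probed per combination; Pre_ excludes s==j inputs whose target_masks contain duplicates, where A's dict-comprehension keeps only the last index of a duplicated mask (an accidental tie-break), and s==j inputs on which A raises (negative j, or a candidate group with an element <= 0 reached by a combination).
-- outside the precondition, e.g. on build_cover_bits([(1, 2)], [3], [3, 3], 2, 2): A returns [2], B returns [3]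
import Mathlib
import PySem

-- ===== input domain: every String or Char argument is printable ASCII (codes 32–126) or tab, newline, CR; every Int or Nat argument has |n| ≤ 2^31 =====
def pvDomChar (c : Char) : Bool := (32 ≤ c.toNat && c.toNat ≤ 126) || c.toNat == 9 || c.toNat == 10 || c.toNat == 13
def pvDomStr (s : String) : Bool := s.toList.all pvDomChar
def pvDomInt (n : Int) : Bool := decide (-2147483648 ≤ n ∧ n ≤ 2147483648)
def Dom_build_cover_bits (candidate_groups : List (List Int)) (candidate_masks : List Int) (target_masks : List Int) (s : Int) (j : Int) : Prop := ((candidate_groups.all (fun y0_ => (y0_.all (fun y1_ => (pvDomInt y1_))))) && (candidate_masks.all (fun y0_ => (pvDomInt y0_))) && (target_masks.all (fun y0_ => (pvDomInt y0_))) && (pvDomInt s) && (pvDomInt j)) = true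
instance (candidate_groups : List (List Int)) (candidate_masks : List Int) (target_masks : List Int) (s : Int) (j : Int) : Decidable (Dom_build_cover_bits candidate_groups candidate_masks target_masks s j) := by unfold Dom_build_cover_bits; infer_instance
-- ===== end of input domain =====

-- B reworks both branches: the general case accumulates target-major into a per-candidate
-- bits array, and the s == j case replaces the mask→index dict probed per combination by a
-- per-candidate set of subset masks plus one forward scan over the targets
-- (objective: alternative, same asymptotic cost).

-- 1 << k (k ≥ 0), shared spelling of Python's left shift in both ports
def pvBit (k : Nat) : Int := (1 : Int) <<< k

-- ===== PORT A =====
-- to_mask: Python raises for x ≤ 0 (1 << negative); such inputs are outside Pre_,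
-- and for 1 ≤ x the `.toNat` is exact.
def pyToMask (group : List Int) : Int :=
  group.foldl (fun mask x => PySem.Int.bor mask (pvBit (x - 1).toNat)) 0

def is_covered_mask (k_mask : Int) (j_mask : Int) (s : Int) : Bool :=
  decide (((PySem.Int.bitCount (PySem.Int.band k_mask j_mask)) : Int) ≥ s)

def build_cover_bits (candidate_groups : List (List Int)) (candidate_masks : List Int)
    (target_masks : List Int) (s : Int) (j : Int) : List Int :=
  if s = j then
    let target_index : PySem.Dict Int Int :=
      (PySem.List.enumerate target_masks).foldl (fun d p => d.insert p.2 p.1) PySem.Dict.empty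
    candidate_groups.foldl (fun cover_bits group =>
      cover_bits ++ [(PySem.List.combinations group j.toNat).foldl (fun (bits : Int) sub_group =>
        match target_index.get? (pyToMask sub_group) with
        | some idx => PySem.Int.bor bits (pvBit idx.toNat)
        | none => bits) 0]) []
  else
    candidate_masks.foldl (fun cover_bits k_mask =>
      cover_bits ++ [(PySem.List.enumerate target_masks).foldl (fun (bits : Int) p =>
        if is_covered_mask k_mask p.2 s then PySem.Int.bor bits (pvBit p.1.toNat)
        else bits) 0]) []

-- ===== PORT B =====
-- inline `m |= 1 << (x - 1)` loop of Source B (same caveat on x ≤ 0 as A's to_mask)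
def altMaskOf (sub_group : List Int) : Int :=
  sub_group.foldl (fun m x => PySem.Int.bor m (pvBit (x - 1).toNat)) 0

def build_cover_bits_alt (candidate_groups : List (List Int)) (candidate_masks : List Int)
    (target_masks : List Int) (s : Int) (j : Int) : List Int :=
  if s = j then
    candidate_groups.foldl (fun cover_bits group =>
      cover_bits ++ [
        let subs : PySem.Set Int :=
          (PySem.List.combinations group j.toNat).foldl
            (fun st sub_group => PySem.Set.add st (altMaskOf sub_group)) PySem.Set.empty
        (PySem.List.enumerate target_masks).foldl (fun (bits : Int) p =>
          if p.2 ∈ subs then PySem.Int.bor bits (pvBit p.1.toNat) else bits) 0]) []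
  else
    (PySem.List.enumerate target_masks).foldl (fun bits_list p =>
      (candidate_masks.zip bits_list).map (fun kb =>
        if ((PySem.Int.bitCount (PySem.Int.band kb.1 p.2)) : Int) ≥ s then
          PySem.Int.bor kb.2 (pvBit p.1.toNat)
        else kb.2)) (List.replicate candidate_masks.length 0)

-- ===== PRECONDITION & SPEC =====
-- Pre_ excludes, for the s == j branch only: (a) inputs where the Python A raises —
-- ValueError for a negative j (itertools.combinations) and for any candidate group with
-- at least j elements containing an element ≤ 0 (1 << negative); and (b) target_masks
-- with duplicate masks, where A's dict comprehension keeps only the LAST index of a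
-- duplicated mask — an accidental tie-break of the dict overwrite which B does not mimic.
def Pre_build_cover_bits (candidate_groups : List (List Int)) (candidate_masks : List Int)
    (target_masks : List Int) (s : Int) (j : Int) : Prop :=
  s = j → target_masks.Nodup ∧
    ∀ g ∈ candidate_groups, 0 ≤ j ∧ (j = 0 ∨ (g.length : Int) < j ∨ ∀ x ∈ g, 1 ≤ x)
instance (candidate_groups : List (List Int)) (candidate_masks : List Int) (target_masks : List Int) (s : Int) (j : Int) : Decidable (Pre_build_cover_bits candidate_groups candidate_masks target_masks s j) := by unfold Pre_build_cover_bits; infer_instance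

def pvWitness_build_cover_bits : List (List Int) × List Int × List Int × Int × Int :=
  ([[1, 2, 3]], [7], [3, 5, 6], 2, 2)

def Spec_build_cover_bits (candidate_groups : List (List Int)) (candidate_masks : List Int) (target_masks : List Int) (s : Int) (j : Int) (out : List Int) : Prop := out = build_cover_bits_alt candidate_groups candidate_masks target_masks s j
instance (candidate_groups : List (List Int)) (candidate_masks : List Int) (target_masks : List Int) (s : Int) (j : Int) (out : List Int) : Decidable (Spec_build_cover_bits candidate_groups candidate_masks target_masks s j out) := by unfold Spec_build_cover_bits; infer_instance

-- ===== CLAIM (what is proved, stated in full; the proofs are below) =====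
def Claim_equal_build_cover_bits : Prop := ∀ (candidate_groups : List (List Int)) (candidate_masks : List Int) (target_masks : List Int) (s : Int) (j : Int), Dom_build_cover_bits candidate_groups candidate_masks target_masks s j → Pre_build_cover_bits candidate_groups candidate_masks target_masks s j → Spec_build_cover_bits candidate_groups candidate_masks target_masks s j (build_cover_bits candidate_groups candidate_masks target_masks s j)

-- ===== LEMMAS AND PROOFS =====

-- ---- Nat bitwise-or "set" algebra ----
theorem pvLorSelf (n : Nat) : n ||| n = n := by simp

def pvOrL (l : List Nat) : Nat := l.foldr (· ||| ·) 0

theorem pvOrL_cons (a : Nat) (l : List Nat) : pvOrL (a :: l) = a ||| pvOrL l := rfl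

theorem pvMem_lor_orL (x : Nat) (l : List Nat) (hx : x ∈ l) : x ||| pvOrL l = pvOrL l := by
  induction l with
  | nil => cases hx
  | cons a l ih =>
    rcases List.mem_cons.mp hx with rfl | h
    · rw [pvOrL_cons, ← Nat.lor_assoc, pvLorSelf]
    · rw [pvOrL_cons, Nat.lor_comm a (pvOrL l), ← Nat.lor_assoc, ih h, Nat.lor_comm]

theorem pvOrL_subset (l₁ l₂ : List Nat) (h : ∀ x ∈ l₁, x ∈ l₂) :
    pvOrL l₁ ||| pvOrL l₂ = pvOrL l₂ := by
  induction l₁ with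
  | nil => simp [pvOrL]
  | cons a l ih =>
    rw [pvOrL_cons, Nat.lor_assoc, ih (fun x hx => h x (List.mem_cons_of_mem a hx)),
      pvMem_lor_orL a l₂ (h a List.mem_cons_self)]

theorem pvOrL_congr_set (l₁ l₂ : List Nat) (h : ∀ x, x ∈ l₁ ↔ x ∈ l₂) :
    pvOrL l₁ = pvOrL l₂ := by
  have h1 := pvOrL_subset l₁ l₂ (fun x hx => (h x).mp hx)
  have h2 := pvOrL_subset l₂ l₁ (fun x hx => (h x).mpr hx)
  rw [← h1, Nat.lor_comm, h2]

theorem pvBit_cast (k : Nat) : pvBit k = (((1 : Nat) <<< k : Nat) : Int) := rfl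

-- a fold OR-ing 1 << (g x) (when g x is defined) is the big OR of those shifted bits
theorem pvFoldl_bor_orL {α : Type} (g : α → Option Nat) (l : List α) (b : Nat) :
    l.foldl (fun (acc : Int) x => match g x with
      | some v => PySem.Int.bor acc (pvBit v)
      | none => acc) ((b : Nat) : Int)
    = ((b ||| pvOrL (l.filterMap (fun x => (g x).map ((1 : Nat) <<< ·)))) : Int) := by
  induction l generalizing b with
  | nil => simp [pvOrL]
  | cons a l ih =>
    cases hg : g a with
    | none => simpa [hg] using ih b
    | some v =>
      simp only [List.foldl_cons, hg]
      rw [pvBit_cast, PySem.Int.bor_natCast, ih (b ||| (1 <<< v))]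
      simp only [List.filterMap_cons, hg, Option.map_some, pvOrL_cons]
      rw [Nat.lor_assoc]

-- ---- the target dict of A is "last index of the mask" ----
def pvLastGet (ps : List (Int × Int)) (m : Int) : Option Int :=
  ps.foldl (fun acc p => if p.2 = m then some p.1 else acc) none

theorem pvLastGet_foldl (ps : List (Int × Int)) (m : Int) (acc : Option Int) :
    ps.foldl (fun acc p => if p.2 = m then some p.1 else acc) acc
      = (pvLastGet ps m).or acc := by
  induction ps generalizing acc with
  | nil => simp [pvLastGet]
  | cons p ps ih =>
    rw [List.foldl_cons, ih]
    have hl : pvLastGet (p :: ps) m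
        = (pvLastGet ps m).or (if p.2 = m then some p.1 else none) := by
      unfold pvLastGet
      rw [List.foldl_cons]
      exact ih (if p.2 = m then some p.1 else none)
    rw [hl]
    cases pvLastGet ps m <;> by_cases hc : p.2 = m <;> simp [hc, Option.or]

theorem pvLastGet_cons (p : Int × Int) (ps : List (Int × Int)) (m : Int) :
    pvLastGet (p :: ps) m = (pvLastGet ps m).or (if p.2 = m then some p.1 else none) := by
  unfold pvLastGet
  rw [List.foldl_cons]
  exact pvLastGet_foldl ps m _

theorem pvDict_get (ps : List (Int × Int)) (d : PySem.Dict Int Int) (m : Int) :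
    (ps.foldl (fun d p => d.insert p.2 p.1) d).get? m = (pvLastGet ps m).or (d.get? m) := by
  induction ps generalizing d with
  | nil => simp [pvLastGet]
  | cons p ps ih =>
    rw [List.foldl_cons, ih, PySem.Dict.get?_insert, pvLastGet_cons]
    cases pvLastGet ps m <;> by_cases h : m = p.2 <;>
      simp [h, eq_comm, Option.or]

theorem pvDict_get_empty (ps : List (Int × Int)) (m : Int) :
    (ps.foldl (fun d p => d.insert p.2 p.1) (PySem.Dict.empty : PySem.Dict Int Int)).get? m
      = pvLastGet ps m := by
  rw [pvDict_get]
  simp [PySem.Dict.get?_empty, Option.or_none]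

-- ---- enumerate characterisations ----
theorem pvMem_enumerate (tm : List Int) (st : Int) (p : Int × Int) :
    p ∈ PySem.List.enumerate tm st ↔ ∃ k : Nat, p.1 = st + k ∧ tm[k]? = some p.2 := by
  induction tm generalizing st with
  | nil => simp [PySem.List.enumerate]
  | cons x tm ih =>
    show p ∈ (st, x) :: PySem.List.enumerate tm (st + 1) ↔ _
    rw [List.mem_cons, ih (st + 1)]
    constructor
    · rintro (rfl | ⟨k, h1, h2⟩)
      · exact ⟨0, by simp⟩
      · exact ⟨k + 1, by push_cast; omega, by simpa using h2⟩
    · rintro ⟨k, h1, h2⟩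
      cases k with
      | zero =>
        left
        simp only [List.getElem?_cons_zero, Option.some_inj] at h2
        obtain ⟨p1, p2⟩ := p
        simp_all
      | succ k =>
        right
        exact ⟨k, by push_cast at h1 ⊢; omega, by simpa using h2⟩

theorem pvLastGet_enum_none (tm : List Int) (st : Int) (m : Int) :
    pvLastGet (PySem.List.enumerate tm st) m = none ↔ m ∉ tm := by
  induction tm generalizing st with
  | nil => simp [pvLastGet, PySem.List.enumerate]
  | cons x tm ih =>
    show pvLastGet ((st, x) :: PySem.List.enumerate tm (st + 1)) m = none ↔ _
    rw [pvLastGet_cons]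
    cases h : pvLastGet (PySem.List.enumerate tm (st + 1)) m with
    | none =>
      have htm : m ∉ tm := (ih (st + 1)).mp h
      by_cases hx : x = m
      · simp [hx, Option.or, htm]
      · simp [hx, Option.or, htm]
        exact fun h' => hx h'.symm
    | some i =>
      have htm : m ∈ tm := by
        by_contra hmem
        rw [(ih (st + 1)).mpr hmem] at h
        cases h
      simp [Option.or, htm]

theorem pvLastGet_enum (tm : List Int) (st : Int) (m : Int) (i : Int) :
    pvLastGet (PySem.List.enumerate tm st) m = some i ↔
      ∃ k : Nat, i = st + k ∧ tm[k]? = some m ∧ m ∉ tm.drop (k + 1) := by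
  induction tm generalizing st i with
  | nil => simp [pvLastGet, PySem.List.enumerate]
  | cons x tm ih =>
    have hrw : pvLastGet (PySem.List.enumerate (x :: tm) st) m
        = (pvLastGet (PySem.List.enumerate tm (st + 1)) m).or
            (if x = m then some st else none) := by
      show pvLastGet ((st, x) :: PySem.List.enumerate tm (st + 1)) m = _
      rw [pvLastGet_cons]
    rw [hrw]
    constructor
    · intro h
      cases hlg : pvLastGet (PySem.List.enumerate tm (st + 1)) m with
      | some i' =>
        rw [hlg] at h
        simp only [Option.or] at h
        obtain ⟨k, hk1, hk2, hk3⟩ := (ih (st + 1) i').mp hlg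
        obtain rfl : i = i' := by simpa using h.symm
        exact ⟨k + 1, by push_cast; omega, by simpa using hk2, by simpa using hk3⟩
      | none =>
        rw [hlg] at h
        have hmem : m ∉ tm := (pvLastGet_enum_none tm (st + 1) m).mp hlg
        by_cases hx : x = m
        · have hst : st = i := by simpa [hx] using h
          exact ⟨0, by omega, by simp [hx], by simpa using hmem⟩
        · simp [hx, Option.or] at h
    · rintro ⟨k, hk1, hk2, hk3⟩
      cases k with
      | zero =>
        simp only [List.getElem?_cons_zero, Option.some_inj] at hk2
        have hmem : m ∉ tm := by simpa using hk3
        rw [(pvLastGet_enum_none tm (st + 1) m).mpr hmem]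
        simp [hk2, hk1, Option.or]
      | succ k =>
        have hs : pvLastGet (PySem.List.enumerate tm (st + 1)) m = some i :=
          (ih (st + 1) i).mpr ⟨k, by push_cast at hk1 ⊢; omega, by simpa using hk2,
            by simpa using hk3⟩
        rw [hs]
        simp [Option.or]

-- nodup: an element sitting at index k does not recur after k
theorem pvNodup_not_mem_drop (tm : List Int) (k : Nat) (m : Int)
    (hnd : tm.Nodup) (hk : tm[k]? = some m) : m ∉ tm.drop (k + 1) := by
  intro hmem
  obtain ⟨l, hl, hget⟩ := List.getElem_of_mem hmem
  rw [List.getElem_drop] at hget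
  have hkk : k < tm.length := (List.getElem?_eq_some_iff.mp hk).1
  have hkv : tm[k] = m := (List.getElem?_eq_some_iff.mp hk).2
  have hlen : k + 1 + l < tm.length := by
    have := List.length_drop (l := tm) (i := k + 1)
    omega
  have : k = k + 1 + l := by
    apply (List.Nodup.getElem_inj_iff hnd).mp
    rw [hkv, hget]
  omega

-- ---- fast path: per-group agreement (target_masks nodup) ----
theorem pvFast_group (tm : List Int) (group : List Int) (r : Nat) (hnd : tm.Nodup) :
    ((PySem.List.combinations group r).foldl (fun (bits : Int) sub_group =>
        match ((PySem.List.enumerate tm).foldl (fun d p => d.insert p.2 p.1)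
            (PySem.Dict.empty : PySem.Dict Int Int)).get? (pyToMask sub_group) with
        | some idx => PySem.Int.bor bits (pvBit idx.toNat)
        | none => bits) 0)
    = ((PySem.List.enumerate tm).foldl (fun (bits : Int) p =>
        if p.2 ∈ ((PySem.List.combinations group r).foldl
              (fun st sub_group => PySem.Set.add st (altMaskOf sub_group)) PySem.Set.empty)
          then PySem.Int.bor bits (pvBit p.1.toNat)
        else bits) 0) := by
  set combs := PySem.List.combinations group r with hcombs
  set E := PySem.List.enumerate tm with hE
  set subs := combs.foldl (fun st sub_group => PySem.Set.add st (altMaskOf sub_group))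
      PySem.Set.empty with hsubs
  have hA : (combs.foldl (fun (bits : Int) sub_group =>
      match (E.foldl (fun d p => d.insert p.2 p.1)
          (PySem.Dict.empty : PySem.Dict Int Int)).get? (pyToMask sub_group) with
      | some idx => PySem.Int.bor bits (pvBit idx.toNat)
      | none => bits) 0)
      = combs.foldl (fun (bits : Int) sub_group =>
        match ((pvLastGet E (pyToMask sub_group)).map Int.toNat) with
        | some v => PySem.Int.bor bits (pvBit v)
        | none => bits) 0 := by
    refine PySem.List.foldl_congr_mem' _ _ _ _ (fun c _ acc => ?_)
    rw [pvDict_get_empty]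
    cases pvLastGet E (pyToMask c) <;> rfl
  have hB : (E.foldl (fun (bits : Int) p =>
      if p.2 ∈ subs then PySem.Int.bor bits (pvBit p.1.toNat) else bits) 0)
      = E.foldl (fun (bits : Int) p =>
        match (if p.2 ∈ subs then some p.1.toNat else none) with
        | some v => PySem.Int.bor bits (pvBit v)
        | none => bits) 0 := by
    refine PySem.List.foldl_congr_mem' _ _ _ _ (fun p _ acc => ?_)
    by_cases h : p.2 ∈ subs
    · rw [if_pos h]
      rw [if_pos h]
    · rw [if_neg h]
      rw [if_neg h]
  rw [hA, hB]
  have h0 : (0 : Int) = ((0 : Nat) : Int) := rfl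
  rw [h0, pvFoldl_bor_orL, pvFoldl_bor_orL]
  congr 1
  rw [Nat.zero_or, Nat.zero_or]
  apply pvOrL_congr_set
  intro x
  simp only [List.mem_filterMap, Option.map_eq_some_iff]
  constructor
  · rintro ⟨c, hc, v, ⟨i, hi, rfl⟩, rfl⟩
    obtain ⟨k, hik, hk2, hk3⟩ :=
      (pvLastGet_enum tm 0 (pyToMask c) i).mp (by rw [hE] at hi; exact hi)
    have hsub : (pyToMask c) ∈ subs := by
      rw [hsubs, PySem.Set.mem_foldl_add]
      exact Or.inr ⟨c, hc, rfl⟩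
    refine ⟨((0 : Int) + (k : Int), pyToMask c), ?_, ((0 : Int) + (k : Int)).toNat, ?_, ?_⟩
    · rw [hE, pvMem_enumerate]
      exact ⟨k, rfl, hk2⟩
    · rw [if_pos hsub]
    · have hnat : ((0 : Int) + (k : Int)).toNat = i.toNat := by omega
      rw [hnat]
  · rintro ⟨p, hp, w, hifeq, rfl⟩
    by_cases hcond : p.2 ∈ subs
    · obtain rfl : p.1.toNat = w := by
        rw [if_pos hcond] at hifeq
        exact Option.some_inj.mp hifeq
      obtain ⟨k, hk1, hk2⟩ := (pvMem_enumerate tm 0 p).mp (by rw [hE] at hp; exact hp)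
      obtain ⟨c, hc, hcm⟩ : ∃ c ∈ combs, p.2 = altMaskOf c := by
        rw [hsubs, PySem.Set.mem_foldl_add] at hcond
        rcases hcond with h | h
        · cases h
        · exact h
      have hmask : altMaskOf c = pyToMask c := rfl
      have hlg : pvLastGet E (pyToMask c) = some p.1 := by
        rw [hE]
        refine (pvLastGet_enum tm 0 (pyToMask c) p.1).mpr ⟨k, by omega, ?_, ?_⟩
        · rw [← hmask, ← hcm]
          exact hk2
        · rw [← hmask, ← hcm]
          exact pvNodup_not_mem_drop tm k p.2 hnd hk2
      exact ⟨c, hc, p.1.toNat, ⟨p.1, hlg, rfl⟩, rfl⟩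
    · rw [if_neg hcond] at hifeq
      cases hifeq

-- ---- general path ----
theorem pvZipMap (cm : List Int) (g : Int → Int) (h : Int → Int → Int) :
    (cm.zip (cm.map g)).map (fun kb => h kb.1 kb.2) = cm.map (fun k => h k (g k)) := by
  induction cm with
  | nil => rfl
  | cons a cm ih => simp [ih]

theorem pvGen (ts : List (Int × Int)) (u : Int → (Int × Int) → Int → Int) (cm : List Int)
    (g : Int → Int) :
    ts.foldl (fun acc p => (cm.zip acc).map (fun kb => u kb.1 p kb.2)) (cm.map g)
      = cm.map (fun k => ts.foldl (fun b p => u k p b) (g k)) := by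
  induction ts generalizing g with
  | nil => rfl
  | cons p ts ih =>
    simp only [List.foldl_cons]
    rw [pvZipMap cm g (fun k b => u k p b), ih (fun k => u k p (g k))]

theorem pvGenSpec (tm cm : List Int) (s : Int) :
    ((PySem.List.enumerate tm).foldl (fun bits_list p =>
        (cm.zip bits_list).map (fun kb =>
          if ((PySem.Int.bitCount (PySem.Int.band kb.1 p.2)) : Int) ≥ s then
            PySem.Int.bor kb.2 (pvBit p.1.toNat)
          else kb.2)) (List.replicate cm.length 0))
      = cm.map (fun k => (PySem.List.enumerate tm).foldl (fun (b : Int) p =>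
          if ((PySem.Int.bitCount (PySem.Int.band k p.2)) : Int) ≥ s then
            PySem.Int.bor b (pvBit p.1.toNat)
          else b) 0) := by
  have hrep : (List.replicate cm.length (0 : Int)) = cm.map (fun _ => 0) := by
    rw [List.map_const']
  rw [hrep]
  exact pvGen (PySem.List.enumerate tm)
    (fun k p b => if ((PySem.Int.bitCount (PySem.Int.band k p.2)) : Int) ≥ s then
      PySem.Int.bor b (pvBit p.1.toNat) else b) cm (fun _ => 0)

-- ===== VERDICT (by name: the statement is the Claim_ definition above) =====
theorem build_cover_bits_spec : Claim_equal_build_cover_bits := by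
  intro cg cm tm s j _ hpre
  unfold Spec_build_cover_bits build_cover_bits build_cover_bits_alt
  by_cases hsj : s = j
  · simp only [if_pos hsj]
    rw [PySem.List.foldl_append_singleton_eq_map, PySem.List.foldl_append_singleton_eq_map]
    simp only [List.nil_append]
    refine List.map_congr_left (fun group _ => ?_)
    exact pvFast_group tm group j.toNat (hpre hsj).1
  · simp only [if_neg hsj]
    rw [PySem.List.foldl_append_singleton_eq_map]
    simp only [List.nil_append]
    rw [pvGenSpec tm cm s]
    refine List.map_congr_left (fun k _ => ?_)
    refine PySem.List.foldl_congr_mem' _ _ _ _ (fun p _ acc => ?_)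
    simp [is_covered_mask]
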